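-- pv_equiv track=rewrite | github.com/anirudhkannanvp/HACKERRANK | WORLD CODESPRINT 12- HACKERRANK/Breaking Sticks - World Codesprint 12 - 3.py | func
-- ===== SOURCE A (Python) =====
-- from math import sqrt,ceil
--
-- def func(n):
--     if(n==0 or n==1):
--         return 0
--     if(n%2==0):
--         return n+func(n//2)
--     else:
--         temp=ceil(sqrt(n))
--         for i in range(3,temp+2,2):
--             if(n%i==0):
--                 return n+func(n//i)
--         return n
-- ===== SOURCE B (Python) =====
-- from math import isqrt
--
-- def func(n):
--     # Iterative accumulator loop over the division chain (A is tail-recursive).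
--     total = 0
--     while n != 0 and n != 1:
--         if n % 2 == 0:
--             p = 2
--         else:
--             p = n
--             r = isqrt(n)
--             i = 3
--             while i <= r:
--                 if n % i == 0:
--                     p = i
--                     break
--                 i += 2
--         total += n
--         n //= p
--     return total
-- ===== Notes on version B (the rewrite author's own statement) =====
-- stated objective: alternative
-- what changed: Tail recursion with a float ceil(sqrt(n)) range scan is replaced by a single iterative accumulator loop that finds the smallest prime factor by trial division of odd i up to isqrt(n).
import Mathlib
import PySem

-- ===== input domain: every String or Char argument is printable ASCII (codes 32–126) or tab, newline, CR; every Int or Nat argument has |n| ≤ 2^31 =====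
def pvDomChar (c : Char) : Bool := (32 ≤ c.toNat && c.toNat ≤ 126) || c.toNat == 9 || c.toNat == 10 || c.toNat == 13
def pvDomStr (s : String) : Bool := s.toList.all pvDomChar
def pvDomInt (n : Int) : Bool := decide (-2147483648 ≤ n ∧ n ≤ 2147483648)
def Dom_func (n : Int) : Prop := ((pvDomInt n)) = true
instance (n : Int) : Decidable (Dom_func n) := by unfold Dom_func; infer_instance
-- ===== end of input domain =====

-- B replaces A's tail recursion (and its float ceil(sqrt) scan) by one iterative
-- accumulator loop with an integer isqrt(n) trial-division bound (objective: alternative).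
-- Like A, B raises ValueError on negative n (isqrt), so those inputs stay outside Pre_.
-- Both recursions are written with a structural fuel counter (n.toNat + 1 steps, provably
-- enough on Pre_) purely as a totality guard; each step is its Python's code.

-- ===== PORT A =====
-- exact value of Python's ceil(sqrt(n)) for 0 ≤ n ≤ 2^31 (double sqrt is correctly
-- rounded there, so ceil(sqrt(n)) = the least s with s*s ≥ n)
def ceilSqrtA (n : Int) : Int :=
  if (Nat.sqrt n.toNat : Int) * (Nat.sqrt n.toNat : Int) = n then (Nat.sqrt n.toNat : Int)
  else (Nat.sqrt n.toNat : Int) + 1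

-- the 'for i in range(...): if n % i == 0: return ...' scan: first divisor found, if any
def loopA (n : Int) : List Int → Option Int
  | [] => none
  | i :: rest => if PySem.Int.mod n i = 0 then some i else loopA n rest

-- A's recursion, fuel-guarded (fuel n.toNat + 1 is enough: each call strictly shrinks n.toNat);
-- the n < 0 branch is a totality guard: Python raises ValueError there (outside Pre_)
def funcGo : Nat → Int → Int
  | 0, _ => 0
  | k + 1, n =>
    if n = 0 ∨ n = 1 then 0
    else if n < 0 then 0
    else if PySem.Int.mod n 2 = 0 then n + funcGo k (PySem.Int.floordiv n 2)
    else
      match loopA n (PySem.List.pyRange 3 (ceilSqrtA n + 2) 2) with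
      | some i => n + funcGo k (PySem.Int.floordiv n i)
      | none => n

def func (n : Int) : Int := funcGo (n.toNat + 1) n

-- ===== PORT B =====
-- math.isqrt; isqrt raises ValueError on n < 0 (outside Pre_), the n < 0 branch is a totality guard
def isqrtB (n : Int) : Int := if n < 0 then 0 else (Nat.sqrt n.toNat : Int)

-- inner 'while i <= r' loop of Source B, fuel-guarded (fuel (r+2-i).toNat is enough)
def innerGo (n r : Int) : Nat → Int → Int
  | 0, _ => n
  | k + 1, i =>
    if i ≤ r then
      if PySem.Int.mod n i = 0 then i else innerGo n r k (i + 2)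
    else n

-- smallest odd i in [i0, r] dividing n, else n (p stays n when the while loop finds no divisor)
def innerB (n r i0 : Int) : Int := innerGo n r (r + 2 - i0).toNat i0

-- outer while loop of Source B: running total over the division chain, fuel-guarded
def loopGo : Nat → Int → Int → Int
  | 0, _, total => total
  | k + 1, n, total =>
    if n = 0 ∨ n = 1 then total
    else if PySem.Int.mod n 2 = 0 then loopGo k (PySem.Int.floordiv n 2) (total + n)
    else loopGo k (PySem.Int.floordiv n (innerB n (isqrtB n) 3)) (total + n)

def func_alt (n : Int) : Int := loopGo (n.toNat + 1) n 0

-- ===== PRECONDITION & SPEC =====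
-- Pre_ excludes exactly the inputs on which the Python A raises: every negative n
-- (math.sqrt of a negative number raises ValueError; B's math.isqrt raises there too).
def Pre_func (n : Int) : Prop := 0 ≤ n
instance (n : Int) : Decidable (Pre_func n) := by unfold Pre_func; infer_instance
def pvWitness_func : Int := 12

def Spec_func (n : Int) (out : Int) : Prop := out = func_alt n
instance (n : Int) (out : Int) : Decidable (Spec_func n out) := by unfold Spec_func; infer_instance

-- ===== CLAIM =====
def Claim_equal_func : Prop := ∀ (n : Int), Dom_func n → Pre_func n → Spec_func n (func n)

-- ===== LEMMAS AND PROOFS =====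

theorem pvEdivLtSelf {a b : Int} (h : 0 < a) (h2 : 1 < b) : a / b < a := by
  rw [Int.ediv_lt_iff_lt_mul (by omega)]
  nlinarith

theorem dvd_of_mod_eq_zero {n j : Int} (h : PySem.Int.mod n j = 0) : j ∣ n :=
  (PySem.Int.mod_eq_zero_iff_dvd n j).1 h

theorem loopA_eq_some {n i : Int} : ∀ {l : List Int}, loopA n l = some i →
    i ∈ l ∧ PySem.Int.mod n i = 0 := by
  intro l
  induction l with
  | nil => intro h; simp [loopA] at h
  | cons x rest ih =>
    intro h
    by_cases hx : PySem.Int.mod n x = 0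
    · simp [loopA, hx] at h; subst h; exact ⟨List.mem_cons_self, hx⟩
    · simp [loopA, hx] at h; exact ⟨List.mem_cons_of_mem _ (ih h).1, (ih h).2⟩

-- step-2 range unfolding (step-2 analogue of PySem.List.pyRange_one_cons)
theorem pyRange_two_cons {i m : Int} (h : i < m) :
    PySem.List.pyRange i m 2 = i :: PySem.List.pyRange (i + 2) m 2 := by
  rw [PySem.List.pyRange_of_pos i m (by norm_num : (0:Int) < 2),
      PySem.List.pyRange_of_pos (i + 2) m (by norm_num : (0:Int) < 2)]
  have hlen : ((m - i + 2 - 1) / 2).toNat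
      = (if i + 2 < m then ((m - (i + 2) + 2 - 1) / 2).toNat else 0) + 1 := by
    split_ifs with h2 <;> omega
  rw [if_pos h, hlen, List.range_succ_eq_map]
  simp only [List.map_cons, List.map_map]
  refine congrArg₂ _ (by norm_num) (List.map_congr_left ?_)
  intro k _
  simp only [Function.comp_apply]
  push_cast
  ring

theorem le_isqrtB_iff {n i : Int} (hn : 0 ≤ n) (hi : 0 ≤ i) :
    i ≤ isqrtB n ↔ i * i ≤ n := by
  unfold isqrtB
  rw [if_neg (by omega)]
  constructor
  · intro h
    have h1 : i.toNat ≤ Nat.sqrt n.toNat := by omega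
    have h2 : i.toNat * i.toNat ≤ n.toNat :=
      le_trans (Nat.mul_le_mul h1 h1) (by have := Nat.sqrt_le' n.toNat; nlinarith)
    have h3 : ((i.toNat * i.toNat : Nat) : Int) ≤ ((n.toNat : Nat) : Int) := by exact_mod_cast h2
    push_cast [Int.toNat_of_nonneg hi, Int.toNat_of_nonneg hn] at h3
    exact h3
  · intro h
    have h3 : ((i.toNat * i.toNat : Nat) : Int) ≤ ((n.toNat : Nat) : Int) := by
      push_cast [Int.toNat_of_nonneg hi, Int.toNat_of_nonneg hn]
      exact h
    have h2 : i.toNat * i.toNat ≤ n.toNat := by exact_mod_cast h3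
    have := Nat.le_sqrt.2 h2
    omega

theorem le_ceilSqrtA {n i : Int} (h0 : 0 ≤ i) (h : i * i ≤ n) : i ≤ ceilSqrtA n := by
  have hn : 0 ≤ n := le_trans (mul_self_nonneg i) h
  have hnat : i.toNat * i.toNat ≤ n.toNat := by
    have h1 : ((i.toNat * i.toNat : Nat) : Int) ≤ ((n.toNat : Nat) : Int) := by
      push_cast [Int.toNat_of_nonneg h0, Int.toNat_of_nonneg hn]
      exact h
    exact_mod_cast h1
  have hs : i.toNat ≤ Nat.sqrt n.toNat := Nat.le_sqrt.2 (by nlinarith [hnat])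
  unfold ceilSqrtA
  split_ifs <;> omega

-- fuel-stability of the inner while loop: any two sufficient fuels give the same value
theorem innerGo_stable (n r : Int) : ∀ (k : Nat), ∀ (k' : Nat) (i : Int),
    (r + 2 - i).toNat ≤ k → (r + 2 - i).toNat ≤ k' → innerGo n r k i = innerGo n r k' i := by
  intro k
  induction k with
  | zero =>
    intro k' i hk hk'
    have hir : ¬ i ≤ r := by omega
    cases k' with
    | zero => rfl
    | succ m => simp [innerGo, hir]
  | succ k ih =>
    intro k' i hk hk'
    cases k' with
    | zero =>
      have hir : ¬ i ≤ r := by omega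
      simp [innerGo, hir]
    | succ m =>
      by_cases hir : i ≤ r
      · show (if i ≤ r then if PySem.Int.mod n i = 0 then i else innerGo n r k (i + 2) else n)
            = (if i ≤ r then if PySem.Int.mod n i = 0 then i else innerGo n r m (i + 2) else n)
        rw [if_pos hir, if_pos hir]
        by_cases hdvd : PySem.Int.mod n i = 0
        · rw [if_pos hdvd, if_pos hdvd]
        · rw [if_neg hdvd, if_neg hdvd]
          exact ih m (i + 2) (by omega) (by omega)
      · simp [innerGo, hir]

-- one-step unfolding of the while loop
theorem innerB_unfold (n r i : Int) :
    innerB n r i = if i ≤ r then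
      (if PySem.Int.mod n i = 0 then i else innerB n r (i + 2)) else n := by
  by_cases hir : i ≤ r
  · obtain ⟨m, hm⟩ : ∃ m, (r + 2 - i).toNat = m + 1 := ⟨(r + 2 - i).toNat - 1, by omega⟩
    rw [innerB, hm]
    show (if i ≤ r then if PySem.Int.mod n i = 0 then i else innerGo n r m (i + 2) else n)
        = if i ≤ r then (if PySem.Int.mod n i = 0 then i else innerB n r (i + 2)) else n
    rw [if_pos hir, if_pos hir]
    by_cases hdvd : PySem.Int.mod n i = 0
    · rw [if_pos hdvd, if_pos hdvd]
    · rw [if_neg hdvd, if_neg hdvd, innerB,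
          innerGo_stable n r m (r + 2 - (i + 2)).toNat (i + 2) (by omega) (le_refl _)]
  · rcases Nat.eq_zero_or_pos (r + 2 - i).toNat with h | h
    · rw [innerB, h]; simp [innerGo, hir]
    · obtain ⟨m, hm⟩ : ∃ m, (r + 2 - i).toNat = m + 1 := ⟨(r + 2 - i).toNat - 1, by omega⟩
      rw [innerB, hm]; simp [innerGo, hir]

-- the result of the inner loop: n itself, or a divisor in [i0, isqrt n]
theorem innerB_cases (n : Int) (hn : 0 ≤ n) : ∀ (k : Nat) (i : Int),
    (isqrtB n + 2 - i).toNat ≤ k → 0 ≤ i → innerB n (isqrtB n) i = n ∨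
    (i ≤ innerB n (isqrtB n) i ∧ innerB n (isqrtB n) i * innerB n (isqrtB n) i ≤ n ∧
     PySem.Int.mod n (innerB n (isqrtB n) i) = 0) := by
  intro k
  induction k with
  | zero =>
    intro i hk hi0
    have hir : ¬ i ≤ isqrtB n := by omega
    rw [innerB_unfold, if_neg hir]
    exact Or.inl rfl
  | succ k ih =>
    intro i hk hi0
    rw [innerB_unfold]
    by_cases hir : i ≤ isqrtB n
    · rw [if_pos hir]
      by_cases hdvd : PySem.Int.mod n i = 0
      · rw [if_pos hdvd]
        exact Or.inr ⟨le_refl _, (le_isqrtB_iff hn hi0).1 hir, hdvd⟩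
      · rw [if_neg hdvd]
        rcases ih (i + 2) (by omega) (by omega) with h | ⟨h1, h2, h3⟩
        · rw [innerB_unfold] at h ⊢
          exact Or.inl h
        · rw [innerB_unfold]
          rw [innerB_unfold] at h1 h2 h3
          exact Or.inr ⟨by omega, h2, h3⟩
    · rw [if_neg hir]
      exact Or.inl rfl

-- fuel-stability of A's recursion: any two sufficient fuels give the same value
theorem funcGo_stable : ∀ (k : Nat), ∀ (k' : Nat) (n : Int), n.toNat < k → n.toNat < k' →
    funcGo k n = funcGo k' n := by
  intro k
  induction k with
  | zero => intro k' n hk _; omega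
  | succ k ih =>
    intro k' n hk hk'
    cases k' with
    | zero => omega
    | succ m =>
      simp only [funcGo]
      by_cases h01 : n = 0 ∨ n = 1
      · rw [if_pos h01, if_pos h01]
      · rw [if_neg h01, if_neg h01]
        by_cases hneg : n < 0
        · rw [if_pos hneg, if_pos hneg]
        · rw [if_neg hneg, if_neg hneg]
          have hn2 : 2 ≤ n := by omega
          by_cases heven : PySem.Int.mod n 2 = 0
          · rw [if_pos heven, if_pos heven]
            have hd : PySem.Int.floordiv n 2 = n / 2 :=
              PySem.Int.floordiv_eq_ediv_of_pos (by norm_num)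
            have h0' : 0 ≤ n / 2 := Int.ediv_nonneg (by omega) (by omega)
            have hlt : n / 2 < n := pvEdivLtSelf (by omega) (by norm_num)
            rw [ih m (PySem.Int.floordiv n 2) (by omega) (by omega)]
          · rw [if_neg heven, if_neg heven]
            rcases h : loopA n (PySem.List.pyRange 3 (ceilSqrtA n + 2) 2) with _ | j
            · rfl
            · show n + funcGo k (PySem.Int.floordiv n j) = n + funcGo m (PySem.Int.floordiv n j)
              obtain ⟨hmem, hmod⟩ := loopA_eq_some h
              have hj : 3 ≤ j := by
                have := (PySem.List.mem_pyRange_iff_of_pos (by norm_num : (0:Int) < 2) j).1 hmem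
                omega
              have hd : PySem.Int.floordiv n j = n / j :=
                PySem.Int.floordiv_eq_ediv_of_pos (by omega)
              have h0' : 0 ≤ n / j := Int.ediv_nonneg (by omega) (by omega)
              have hlt : n / j < n := pvEdivLtSelf (by omega) (by omega)
              rw [ih m (PySem.Int.floordiv n j) (by omega) (by omega)]

-- with sufficient fuel, funcGo is func
theorem funcGo_eq_func (k : Nat) (n : Int) (hk : n.toNat < k) (_h0 : 0 ≤ n) :
    funcGo k n = func n :=
  funcGo_stable k (n.toNat + 1) n hk (by omega)

theorem func_zero_one : func 0 = 0 ∧ func 1 = 0 := by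
  constructor <;> (unfold func; simp [funcGo])

-- The odd-case scan when the bound is already exceeded: A's remaining range scan finds
-- nothing smaller than i, and B's while loop exits with p = n.
theorem scan_base (n : Int) (hn : 3 ≤ n) (i : Int) (hi : 3 ≤ i)
    (hprev : ∀ j : Int, 2 ≤ j → j < i → ¬ j ∣ n) (hle : ¬ i ≤ isqrtB n) :
    (match loopA n (PySem.List.pyRange i (ceilSqrtA n + 2) 2) with
     | some j => n + func (PySem.Int.floordiv n j)
     | none => n) = n + func (PySem.Int.floordiv n (innerB n (isqrtB n) i)) := by
  have hle' : ¬ i * i ≤ n := fun h => hle ((le_isqrtB_iff (by omega) (by omega)).2 h)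
  rw [not_le] at hle'
  have hfdiv_self : PySem.Int.floordiv n n = 1 := by
    unfold PySem.Int.floordiv; rw [Int.fdiv_self (by omega)]
  rw [innerB_unfold, if_neg hle, hfdiv_self, func_zero_one.2, add_zero]
  rcases h : loopA n (PySem.List.pyRange i (ceilSqrtA n + 2) 2) with _ | j
  · rfl
  · show n + func (PySem.Int.floordiv n j) = n
    obtain ⟨hmem, hmod⟩ := loopA_eq_some h
    have hj := (PySem.List.mem_pyRange_iff_of_pos (by norm_num : (0:Int) < 2) j).1 hmem
    have hjdvd : j ∣ n := dvd_of_mod_eq_zero hmod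
    have hjj : n < j * j := by nlinarith [hj.1]
    obtain ⟨q, hq⟩ := hjdvd
    have hjpos : 0 < j := by omega
    have hqpos : 1 ≤ q := by nlinarith
    have hqj : q < j := by nlinarith
    rcases eq_or_lt_of_le hqpos with hq1 | hq2
    · -- q = 1, so j = n: A returns n + func(n // n) = n
      have hjn : j = n := by rw [hq, ← hq1, mul_one]
      rw [hjn, hfdiv_self, func_zero_one.2, add_zero]
    · -- 2 ≤ q: q would be a divisor smaller than i, contradicting hprev
      exfalso
      have hqq : q * q < n := by nlinarith
      have hqi : q < i := by by_contra hc; rw [not_lt] at hc; nlinarith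
      exact hprev q (by omega) hqi ⟨j, by rw [hq]; ring⟩

-- The odd-case scan: A's range scan (bounded by ceil(sqrt)+1) and B's isqrt-bounded
-- while loop lead to the same continuation value.
theorem scan_eq (n : Int) (hn : 3 ≤ n) (hodd : n % 2 = 1) :
    ∀ (fuel : Nat) (i : Int), (n + 3 - i).toNat ≤ fuel → 3 ≤ i → i % 2 = 1 →
    (∀ j : Int, 2 ≤ j → j < i → ¬ j ∣ n) →
    (match loopA n (PySem.List.pyRange i (ceilSqrtA n + 2) 2) with
     | some j => n + func (PySem.Int.floordiv n j)
     | none => n) = n + func (PySem.Int.floordiv n (innerB n (isqrtB n) i)) := by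
  intro fuel
  induction fuel with
  | zero =>
    intro i hfuel hi _ hprev
    refine scan_base n hn i hi hprev ?_
    intro hle
    have hile : i * i ≤ n := (le_isqrtB_iff (by omega) (by omega)).1 hle
    have hi2 : n + 3 ≤ i := by omega
    nlinarith [sq_nonneg (i - 1)]
  | succ k ih =>
    intro i hfuel hi hiodd hprev
    by_cases hle : i ≤ isqrtB n
    · have hii : i * i ≤ n := (le_isqrtB_iff (by omega) (by omega)).1 hle
      have hin : i ≤ n := by nlinarith
      have hcons : PySem.List.pyRange i (ceilSqrtA n + 2) 2
          = i :: PySem.List.pyRange (i + 2) (ceilSqrtA n + 2) 2 := by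
        have := le_ceilSqrtA (by omega : (0:Int) ≤ i) hii
        exact pyRange_two_cons (by omega)
      by_cases hdvd : PySem.Int.mod n i = 0
      · have hA : loopA n (PySem.List.pyRange i (ceilSqrtA n + 2) 2) = some i := by
          rw [hcons]; simp [loopA, hdvd]
        rw [innerB_unfold, if_pos hle, if_pos hdvd, hA]
      · have hA : loopA n (PySem.List.pyRange i (ceilSqrtA n + 2) 2)
            = loopA n (PySem.List.pyRange (i + 2) (ceilSqrtA n + 2) 2) := by
          rw [hcons]; simp [loopA, hdvd]
        rw [innerB_unfold, if_pos hle, if_neg hdvd, hA]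
        refine ih (i + 2) (by omega) (by omega) (by omega) ?_
        intro j hj2 hjlt hjdvd
        rcases lt_or_ge j i with hjlti | hge
        · exact hprev j hj2 hjlti hjdvd
        · rcases (by omega : j = i ∨ j = i + 1) with rfl | rfl
          · exact hdvd ((PySem.Int.mod_eq_zero_iff_dvd n j).2 hjdvd)
          · have h2n : (2:Int) ∣ n := dvd_trans (by omega : (2:Int) ∣ i + 1) hjdvd
            omega
    · exact scan_base n hn i hi hprev hle

theorem loopGo_eq_func : ∀ (k : Nat) (n total : Int), n.toNat < k → 0 ≤ n →
    loopGo k n total = total + func n := by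
  intro k
  induction k with
  | zero => intro n total hk h0; omega
  | succ k ih =>
    intro n total hk h0
    by_cases h01 : n = 0 ∨ n = 1
    · have hf : func n = 0 := by
        rcases h01 with rfl | rfl
        · exact func_zero_one.1
        · exact func_zero_one.2
      simp [loopGo, if_pos h01, hf]
    · have hn2 : 2 ≤ n := by omega
      have hfn : func n = funcGo (n.toNat + 1) n := rfl
      by_cases heven : PySem.Int.mod n 2 = 0
      · have hd : PySem.Int.floordiv n 2 = n / 2 :=
          PySem.Int.floordiv_eq_ediv_of_pos (by norm_num)
        have h0' : 0 ≤ n / 2 := Int.ediv_nonneg (by omega) (by omega)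
        have hlt : n / 2 < n := pvEdivLtSelf (by omega) (by norm_num)
        rw [show loopGo (k+1) n total
              = loopGo k (PySem.Int.floordiv n 2) (total + n) by
            simp only [loopGo]; rw [if_neg h01, if_pos heven]]
        rw [ih (PySem.Int.floordiv n 2) (total + n) (by omega) (by omega)]
        rw [hfn]
        show total + n + func (PySem.Int.floordiv n 2) = total + funcGo (n.toNat + 1) n
        simp only [funcGo, if_neg h01, if_neg (by omega : ¬ n < 0), if_pos heven]
        rw [funcGo_eq_func n.toNat (PySem.Int.floordiv n 2) (by omega) (by omega)]
        ring
      · have hodd : n % 2 = 1 := by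
          have := PySem.Int.mod_eq_emod_of_pos (a := n) (by norm_num : (0:Int) < 2)
          omega
        have hn3 : 3 ≤ n := by omega
        have hp : 2 ≤ innerB n (isqrtB n) 3 ∧ innerB n (isqrtB n) 3 ≤ n := by
          rcases innerB_cases n (by omega) ((isqrtB n + 2 - 3).toNat) 3 (le_refl _) (by norm_num)
            with h | ⟨h1, h2, _⟩
          · omega
          · exact ⟨by omega, by nlinarith⟩
        have hd : PySem.Int.floordiv n (innerB n (isqrtB n) 3) = n / innerB n (isqrtB n) 3 :=
          PySem.Int.floordiv_eq_ediv_of_pos (by omega)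
        have h0' : 0 ≤ n / innerB n (isqrtB n) 3 := Int.ediv_nonneg (by omega) (by omega)
        have hlt : n / innerB n (isqrtB n) 3 < n := pvEdivLtSelf (by omega) (by omega)
        rw [show loopGo (k+1) n total
              = loopGo k (PySem.Int.floordiv n (innerB n (isqrtB n) 3)) (total + n) by
            simp only [loopGo]; rw [if_neg h01, if_neg heven]]
        rw [ih (PySem.Int.floordiv n (innerB n (isqrtB n) 3)) (total + n) (by omega) (by omega)]
        rw [hfn]
        show total + n + func (PySem.Int.floordiv n (innerB n (isqrtB n) 3))
            = total + funcGo (n.toNat + 1) n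
        simp only [funcGo, if_neg h01, if_neg (by omega : ¬ n < 0), if_neg heven]
        have hscan := scan_eq n hn3 hodd ((n + 3 - 3).toNat) 3 (le_refl _) (by norm_num)
            (by norm_num)
            (by intro j hj2 hjlt hjdvd
                have : j = 2 := by omega
                subst this
                omega)
        -- rewrite the funcGo n.toNat continuations in the match to func via stability
        have hmatch : (match loopA n (PySem.List.pyRange 3 (ceilSqrtA n + 2) 2) with
            | some i => n + funcGo n.toNat (PySem.Int.floordiv n i)
            | none => n)
            = (match loopA n (PySem.List.pyRange 3 (ceilSqrtA n + 2) 2) with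
            | some i => n + func (PySem.Int.floordiv n i)
            | none => n) := by
          rcases h : loopA n (PySem.List.pyRange 3 (ceilSqrtA n + 2) 2) with _ | j
          · rfl
          · show n + funcGo n.toNat (PySem.Int.floordiv n j) = n + func (PySem.Int.floordiv n j)
            obtain ⟨hmem, hmod⟩ := loopA_eq_some h
            have hj : 3 ≤ j := by
              have := (PySem.List.mem_pyRange_iff_of_pos (by norm_num : (0:Int) < 2) j).1 hmem
              omega
            have hdj : PySem.Int.floordiv n j = n / j :=
              PySem.Int.floordiv_eq_ediv_of_pos (by omega)
            have h0j : 0 ≤ n / j := Int.ediv_nonneg (by omega) (by omega)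
            have hltj : n / j < n := pvEdivLtSelf (by omega) (by omega)
            rw [funcGo_eq_func n.toNat (PySem.Int.floordiv n j) (by omega) (by omega)]
        rw [hmatch, hscan]
        ring

-- ===== VERDICT =====
theorem func_spec : Claim_equal_func := by
  intro n _ hpre
  unfold Spec_func func_alt
  rw [loopGo_eq_func (n.toNat + 1) n 0 (by omega) hpre]
  omega
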